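-- pv_equiv track=rewrite | github.com/rafamdr/coding_chanllenges | largestNumberFromArrays/main.py | max_num_ref
-- ===== SOURCE A (Python) =====
-- import heapq
-- from typing import List
--
-- def max_num_ref(n: List[int], m: List[int], k: int) -> int:
--     heap_arr = []
--     heapq.heapify(heap_arr)
--
--     def add_to_heap(h: List[int], elem: int, k: int):
--         if len(h) < k:
--             heapq.heappush(h, elem)
--         elif elem > h[0]:
--             heapq.heapreplace(h, elem)
--
--     for elem in n:  # n * log(k)
--         add_to_heap(heap_arr, elem, k)
--
--     for elem in m:  # m * log(k)
--         add_to_heap(heap_arr, elem, k)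
--
--     result = 0
--     cnt = 1
--
--     while len(heap_arr) > 0:  # summation log(k) 1 to k = log(k!)
--         result += heapq.heappop(heap_arr) * cnt
--         cnt *= 10
--
--     return result
-- ===== SOURCE B (Python) =====
-- def max_num_ref(n, m, k):
--     # sort everything once, take the k largest (descending), build the number MSB-first by Horner
--     top = sorted(n + m, reverse=True)[:k]
--     result = 0
--     for x in top:
--         result = result * 10 + x
--     return result
-- ===== Notes on version B (the rewrite author's own statement) =====
-- stated objective: simpler
-- what changed: A maintains a bounded min-heap of size k while scanning both arrays and then pops it with an explicit place-value counter; B sorts the concatenation once in descending order, slices the first k elements and folds them with Horner's rule (result = result*10 + x), with no heap and no counter.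
import Mathlib
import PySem

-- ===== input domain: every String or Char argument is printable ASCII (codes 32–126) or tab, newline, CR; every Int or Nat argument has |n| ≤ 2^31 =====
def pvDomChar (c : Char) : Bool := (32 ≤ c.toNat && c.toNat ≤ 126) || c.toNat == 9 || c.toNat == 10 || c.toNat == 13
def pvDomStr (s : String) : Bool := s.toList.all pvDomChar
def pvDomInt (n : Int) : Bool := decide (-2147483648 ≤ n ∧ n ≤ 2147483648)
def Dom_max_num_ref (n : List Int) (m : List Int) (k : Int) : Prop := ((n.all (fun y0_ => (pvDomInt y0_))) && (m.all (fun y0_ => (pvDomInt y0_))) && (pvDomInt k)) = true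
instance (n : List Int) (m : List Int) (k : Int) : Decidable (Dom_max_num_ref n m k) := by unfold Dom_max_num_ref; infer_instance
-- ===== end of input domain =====

-- A keeps a bounded min-heap of the k largest elements and pops it with a place-value counter;
-- B sorts the concatenation once descending, takes the first k and folds them with Horner's rule (simpler, no heap).


-- ===== PORT A =====
-- heapq's min-heap is ported exactly as a min-priority queue held as an ascending ordered list
-- (same abstract queue states and the same popped values in the same order):
-- heappush = ordered insert, h[0] = head (the minimum), heapreplace = pop the min then push, heappop = head & tail.
def pyHeappush (h : List Int) (e : Int) : List Int :=
  PySem.List.insertBy (fun a b => decide (a < b)) e h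

-- add_to_heap(h, elem, k) of A
def addToHeap (h : List Int) (e : Int) (k : Int) : List Int :=
  if PySem.List.len h < k then pyHeappush h e
  else match h with
    | [] => []                      -- Python raises IndexError on h[0] here; excluded by Pre_
    | h0 :: t => if h0 < e then pyHeappush t e else h0 :: t   -- elem > h[0] → heapreplace

-- the `while len(heap_arr) > 0` pop loop with its (result, cnt) state
def popLoopA (h : List Int) (result cnt : Int) : Int :=
  match h with
  | [] => result
  | x :: t => popLoopA t (result + x * cnt) (cnt * 10)

def max_num_ref (n : List Int) (m : List Int) (k : Int) : Int :=
  popLoopA (m.foldl (fun h e => addToHeap h e k) (n.foldl (fun h e => addToHeap h e k) [])) 0 1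

-- ===== PORT B =====
def max_num_ref_alt (n : List Int) (m : List Int) (k : Int) : Int :=
  (PySem.List.slice (PySem.List.sorted (n ++ m) (fun x => x) true) none (some k)).foldl
    (fun r x => r * 10 + x) 0

-- ===== PRECONDITION & SPEC =====
-- Pre_ excludes exactly the inputs on which A raises IndexError (k ≤ 0 with a nonempty array:
-- `elem > h[0]` indexes the empty heap); A returns on every input Pre_ admits.
def Pre_max_num_ref (n : List Int) (m : List Int) (k : Int) : Prop :=
  0 < k ∨ (n = [] ∧ m = [])
instance (n : List Int) (m : List Int) (k : Int) : Decidable (Pre_max_num_ref n m k) := by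
  unfold Pre_max_num_ref; infer_instance

def pvWitness_max_num_ref : List Int × List Int × Int := ([3, 1], [2], 2)

def Spec_max_num_ref (n : List Int) (m : List Int) (k : Int) (out : Int) : Prop := out = max_num_ref_alt n m k
instance (n : List Int) (m : List Int) (k : Int) (out : Int) : Decidable (Spec_max_num_ref n m k out) := by unfold Spec_max_num_ref; infer_instance

-- ===== CLAIM (what is proved, stated in full; the proofs are below) =====
def Claim_equal_max_num_ref : Prop := ∀ (n : List Int) (m : List Int) (k : Int), Dom_max_num_ref n m k → Pre_max_num_ref n m k → Spec_max_num_ref n m k (max_num_ref n m k)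

-- ===== LEMMAS AND PROOFS =====

-- ascending sort of the concatenation (proof-side abbreviation)
def sAsc (xs : List Int) : List Int := PySem.List.sorted xs (fun x => x) false
-- the last k' elements of an ascending list = its k' largest
def topk (l : List Int) (k' : Nat) : List Int := l.drop (l.length - k')
-- the value the pop loop accumulates over an ascending list
def pvVal : List Int → Int
  | [] => 0
  | x :: t => x + 10 * pvVal t

theorem length_insertBy (before : Int → Int → Bool) (e : Int) (l : List Int) :
    (PySem.List.insertBy before e l).length = l.length + 1 := by
  induction l with
  | nil => rfl
  | cons x t ih =>
    simp only [PySem.List.insertBy]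
    split <;> simp [ih]

theorem insertBy_pass (before : Int → Int → Bool) (e : Int) (l1 l2 : List Int)
    (h : ∀ x ∈ l1, before e x = false) :
    PySem.List.insertBy before e (l1 ++ l2) = l1 ++ PySem.List.insertBy before e l2 := by
  induction l1 with
  | nil => rfl
  | cons x t ih =>
    simp only [List.cons_append, PySem.List.insertBy, h x (by simp)]
    simp only [Bool.false_eq_true, if_false, List.cons.injEq, true_and]
    exact ih (fun y hy => h y (by simp [hy]))

theorem insertBy_all_ge (e : Int) (t : List Int) (h : ∀ x ∈ t, e ≤ x) :
    PySem.List.insertBy (fun a b => decide (a < b)) e t = e :: t := by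
  induction t with
  | nil => rfl
  | cons x t ih =>
    simp only [PySem.List.insertBy]
    by_cases hx : e < x
    · simp [hx]
    · have hxe : x = e := le_antisymm (not_lt.mp hx) (h x (by simp))
      rw [if_neg (by simp [hx]), ih (fun y hy => h y (by simp [hy])), hxe]

theorem insertBy_lt_prefix (e h0 : Int) (pre t : List Int) (h : e < h0) :
    ∃ q : List Int, PySem.List.insertBy (fun a b => decide (a < b)) e (pre ++ h0 :: t) = q ++ h0 :: t ∧ q.length = pre.length + 1 := by
  induction pre with
  | nil => exact ⟨[e], by simp [PySem.List.insertBy, h], by simp⟩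
  | cons x p ih =>
    by_cases hx : e < x
    · exact ⟨e :: x :: p, by simp [PySem.List.insertBy, hx], by simp⟩
    · obtain ⟨q, hq, hlen⟩ := ih
      exact ⟨x :: q, by simp [PySem.List.insertBy, hx, hq], by simp [hlen]⟩

theorem sAsc_append_singleton (p : List Int) (e : Int) :
    sAsc (p ++ [e]) = PySem.List.insertBy (fun a b => decide (a < b)) e (sAsc p) := by
  simp only [sAsc, PySem.List.sorted_eq_foldl_insertBy, List.foldl_append, List.foldl]

theorem sAsc_pairwise (xs : List Int) : (sAsc xs).Pairwise (· ≤ ·) :=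
  PySem.List.sorted_pairwise xs (fun x => x)

theorem addToHeap_sorted (L : List Int) (e : Int) (k : Int) (hk : 0 < k)
    (hLp : L.Pairwise (· ≤ ·)) :
    addToHeap (topk L k.toNat) e k
      = topk (PySem.List.insertBy (fun a b => decide (a < b)) e L) k.toNat := by
  have hk0 : 0 < k.toNat := by omega
  by_cases hlen : L.length < k.toNat
  · have h1 : topk L k.toNat = L := by
      unfold topk; rw [Nat.sub_eq_zero_of_le (le_of_lt hlen)]; rfl
    rw [h1]
    unfold addToHeap
    rw [if_pos (by simp only [PySem.List.len_eq]; omega)]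
    unfold topk pyHeappush
    rw [length_insertBy, Nat.sub_eq_zero_of_le (by omega)]
    rfl
  · rw [not_lt] at hlen
    have hds : L.take (L.length - k.toNat) ++ L.drop (L.length - k.toNat) = L :=
      List.take_append_drop _ L
    have hlen_drop : (L.drop (L.length - k.toNat)).length = k.toNat := by
      rw [List.length_drop]; omega
    obtain ⟨h0, t, hht⟩ : ∃ h0 t, L.drop (L.length - k.toNat) = h0 :: t := by
      cases hcase : L.drop (L.length - k.toNat) with
      | nil => rw [hcase] at hlen_drop; simp at hlen_drop; omega
      | cons a b => exact ⟨a, b, rfl⟩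
    have htopk : topk L k.toNat = h0 :: t := by unfold topk; rw [hht]
    have hpre_len : (L.take (L.length - k.toNat)).length = L.length - k.toNat := by
      rw [List.length_take]; omega
    have hpw := hLp
    rw [← hds, hht, List.pairwise_append] at hpw
    have hpre_le : ∀ x ∈ L.take (L.length - k.toNat), x ≤ h0 :=
      fun x hx => hpw.2.2 x hx h0 (by simp)
    have ht_ge : ∀ x ∈ t, h0 ≤ x := (List.pairwise_cons.mp (by
      rw [← hht]; exact hLp.sublist (List.drop_sublist _ L))).1
    rw [htopk]
    have hht_len : (h0 :: t).length = k.toNat := by rw [← hht]; exact hlen_drop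
    unfold addToHeap
    rw [if_neg (by simp only [PySem.List.len_eq, hht_len]; omega)]
    have hres_len : topk (PySem.List.insertBy (fun a b => decide (a < b)) e L) k.toNat
        = (PySem.List.insertBy (fun a b => decide (a < b)) e L).drop (L.length - k.toNat + 1) := by
      unfold topk
      rw [length_insertBy]
      congr 1
      omega
    change (if h0 < e then pyHeappush t e else h0 :: t) = _
    rw [hres_len]
    have hpass : ¬ e < h0 → PySem.List.insertBy (fun a b => decide (a < b)) e L
        = L.take (L.length - k.toNat) ++ (h0 :: PySem.List.insertBy (fun a b => decide (a < b)) e t) := by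
      intro hne
      conv_lhs => rw [← hds, hht]
      rw [insertBy_pass _ _ _ _
        (fun x hx => decide_eq_false (fun hc => absurd (hpre_le x hx) (by omega)))]
      congr 1
      show PySem.List.insertBy _ e (h0 :: t) = _
      simp only [PySem.List.insertBy]
      rw [if_neg (by simp [hne])]
    by_cases he : h0 < e
    · -- elem > h[0] : heapreplace, the new element joins the kept tail
      rw [if_pos he, hpass (by omega), List.append_cons,
        List.drop_left' (by simp [hpre_len])]
      rfl
    · rw [if_neg he]
      rcases lt_or_eq_of_le (not_lt.mp he) with helt | heq
      · -- e < h0 : e lands strictly before the kept block, which is unchanged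
        obtain ⟨q, hq, hqlen⟩ :=
          insertBy_lt_prefix e h0 (L.take (L.length - k.toNat)) t helt
        have hLb : L.take (L.length - k.toNat) ++ h0 :: t = L := by rw [← hht, hds]
        conv_rhs => rw [← hLb]
        rw [hq, List.drop_left' (by
          simp only [hqlen, hpre_len, List.length_append, ← hht,
            List.length_drop]
          omega)]
      · -- e = h0 : the sorted list gains a duplicate of the minimum; same kept values
        rw [hpass (by omega), List.append_cons, List.drop_left' (by simp [hpre_len]),
          insertBy_all_ge e t (fun x hx => heq ▸ ht_ge x hx), heq]

theorem addToHeap_step (p : List Int) (e : Int) (k : Int) (hk : 0 < k) :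
    addToHeap (topk (sAsc p) k.toNat) e k = topk (sAsc (p ++ [e])) k.toNat := by
  rw [sAsc_append_singleton]
  exact addToHeap_sorted (sAsc p) e k hk (sAsc_pairwise p)

theorem fold_invariant (k : Int) (hk : 0 < k) (xs : List Int) : ∀ p : List Int,
    xs.foldl (fun h e => addToHeap h e k) (topk (sAsc p) k.toNat) = topk (sAsc (p ++ xs)) k.toNat := by
  induction xs with
  | nil => intro p; simp
  | cons x t ih =>
    intro p
    have := ih (p ++ [x])
    simp only [List.foldl_cons, addToHeap_step p x k hk, this, List.append_assoc, List.cons_append, List.nil_append]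

theorem popLoopA_val (s : List Int) : ∀ r c : Int, popLoopA s r c = r + c * pvVal s := by
  induction s with
  | nil => intro r c; simp [popLoopA, pvVal]
  | cons x t ih => intro r c; simp [popLoopA, pvVal, ih]; ring

theorem horner_reverse (s : List Int) :
    (s.reverse).foldl (fun r x => r * 10 + x) 0 = pvVal s := by
  induction s with
  | nil => rfl
  | cons x t ih => simp [List.foldl_append, pvVal, ih]; ring

theorem sortedDesc_eq_reverse (xs : List Int) :
    PySem.List.sorted xs (fun x => x) true = (sAsc xs).reverse := by
  refine List.eq_of_perm_of_sorted (le := fun a b : Int => b ≤ a) ?_ ?_ ?_ ?_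
  · intro a b _ _ h1 h2; omega
  · exact PySem.List.sorted_pairwise_rev xs (fun x => x)
  · exact (List.pairwise_reverse).mpr (sAsc_pairwise xs)
  · exact (PySem.List.sorted_perm xs (fun x => x) true).trans
      ((PySem.List.sorted_perm xs (fun x => x) false).symm.trans (List.reverse_perm (sAsc xs)).symm)

-- ===== VERDICT (by name: the statement is the Claim_ definition above) =====
theorem max_num_ref_spec : Claim_equal_max_num_ref := by
  intro n m k _ hpre
  unfold Spec_max_num_ref max_num_ref max_num_ref_alt
  rcases hpre with hk | ⟨hn, hm⟩
  · -- A's final heap is the k largest elements in ascending order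
    have hA1 := fold_invariant k hk n []
    have hA2 := fold_invariant k hk m n
    have hS0 : topk (sAsc []) k.toNat = [] := by
      simp [sAsc, topk, PySem.List.sorted]
    rw [hS0] at hA1
    simp only [List.nil_append] at hA1
    rw [hA1, hA2]
    -- B's slice is the reverse of that list
    rw [sortedDesc_eq_reverse, PySem.List.slice_to _ (le_of_lt hk)]
    have htr : List.take k.toNat (sAsc (n ++ m)).reverse
        = (topk (sAsc (n ++ m)) k.toNat).reverse := by
      have h := List.reverse_take (l := (sAsc (n ++ m)).reverse) (i := k.toNat)
      rw [List.reverse_reverse, List.length_reverse] at h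
      rw [← List.reverse_reverse (List.take k.toNat (sAsc (n ++ m)).reverse), h]
      rfl
    rw [htr, horner_reverse, popLoopA_val]
    ring
  · subst hn; subst hm
    have hslice : PySem.List.slice
        (PySem.List.sorted (([] : List Int) ++ []) (fun x => x) true) none (some k) = [] :=
      List.eq_nil_iff_forall_not_mem.mpr (fun x hx => by
        have hmem := PySem.List.mem_of_mem_slice _ none (some k) hx
        rw [PySem.List.mem_sorted] at hmem
        simp at hmem)
    rw [hslice]
    rfl
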